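-- pv_equiv track=rewrite | github.com/bzitko/prog2_pub_repo | exam1/02_cak.py | cak
-- ===== SOURCE A (Python) =====
-- def cak(znakovi, koraci):
--     n = len(znakovi)
--
--     if n == 1:
--         return znakovi[0] * len(koraci)
--
--     i = 0
--     rezultat = ""
--
--     for k in koraci:
--         s = 1 if k > 0 else -1
--         for _ in range(abs(k)):
--             if i == 0 and s == -1:
--                 i += 1
--                 s = 1
--             elif i == n - 1 and s == 1:
--                 i -= 1
--                 s = -1
--             else:
--                 i += s
--
--         rezultat += znakovi[i]
--     return rezultat
-- ===== SOURCE B (Python) =====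
-- def cak(znakovi, koraci):
--     n = len(znakovi)
--     if n == 1:
--         return znakovi[0] * len(koraci)
--     L = 2 * (n - 1)
--     i = 0
--     out = []
--     for k in koraci:
--         p = (i + k) % L
--         i = p if p < n else L - p
--         out.append(znakovi[i])
--     return "".join(out)
-- ===== Notes on version B (the rewrite author's own statement) =====
-- stated objective: faster
-- what changed: B replaces A's step-by-step bounce simulation (inner loop of |k| iterations per step) with a closed-form triangle-wave reflection: the new index is reflect((i+k) mod 2(n-1)) computed in O(1) per step.
import Mathlib
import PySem

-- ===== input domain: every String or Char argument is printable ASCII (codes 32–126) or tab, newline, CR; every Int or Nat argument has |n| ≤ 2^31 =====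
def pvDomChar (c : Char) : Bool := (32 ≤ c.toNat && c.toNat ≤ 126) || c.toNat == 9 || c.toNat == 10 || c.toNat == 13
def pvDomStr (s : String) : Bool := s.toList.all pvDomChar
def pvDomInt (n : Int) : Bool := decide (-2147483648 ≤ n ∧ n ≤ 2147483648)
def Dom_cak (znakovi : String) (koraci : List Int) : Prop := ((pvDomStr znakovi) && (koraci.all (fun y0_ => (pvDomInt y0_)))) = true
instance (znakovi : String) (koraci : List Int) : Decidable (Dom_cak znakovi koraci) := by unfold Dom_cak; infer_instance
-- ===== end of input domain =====

-- B replaces A's per-unit bounce simulation with an O(1) closed-form reflection per step (asymptotically faster, O(len koraci)).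

-- ===== PORT A =====
-- one unit step of A's bouncing cursor: state (i, s)
def cakStep (n i s : Int) : Int × Int :=
  if i = 0 ∧ s = -1 then (i + 1, 1)
  else if i = n - 1 ∧ s = 1 then (i - 1, -1)
  else (i + s, s)

-- A's inner 'for _ in range(abs(k))' loop
def cakWalk (n : Int) : Nat → Int × Int → Int × Int
  | 0, st => st
  | m+1, st => cakWalk n m (cakStep n st.1 st.2)

-- body of A's 'for k in koraci' loop: state (i, rezultat)
def cakStepA (cs : List Char) (n : Int) (st : Int × List Char) (k : Int) : Int × List Char :=
  ((cakWalk n k.natAbs (st.1, if 0 < k then 1 else -1)).1,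
   st.2 ++ [(PySem.List.pyGet? cs (cakWalk n k.natAbs (st.1, if 0 < k then 1 else -1)).1).getD ' '])

def cak (znakovi : String) (koraci : List Int) : String :=
  if (znakovi.toList.length : Int) = 1 then
    String.ofList (List.replicate koraci.length ((PySem.List.pyGet? znakovi.toList 0).getD ' '))
  else
    String.ofList ((koraci.foldl (cakStepA znakovi.toList (znakovi.toList.length : Int)) (0, [])).2)

-- ===== PORT B =====
-- body of B's loop: p = (i+k) % L, i' = p if p < n else L - p; out collects one-char pieces
def cakStepB (cs : List Char) (n L : Int) (st : Int × List (List Char)) (k : Int) : Int × List (List Char) :=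
  ((if PySem.Int.mod (st.1 + k) L < n then PySem.Int.mod (st.1 + k) L else L - PySem.Int.mod (st.1 + k) L),
   st.2 ++ [[(PySem.List.pyGet? cs (if PySem.Int.mod (st.1 + k) L < n then PySem.Int.mod (st.1 + k) L else L - PySem.Int.mod (st.1 + k) L)).getD ' ']])

def cak_alt (znakovi : String) (koraci : List Int) : String :=
  if (znakovi.toList.length : Int) = 1 then
    String.ofList (List.replicate koraci.length ((PySem.List.pyGet? znakovi.toList 0).getD ' '))
  else
    String.ofList (PySem.Chars.join []
      ((koraci.foldl (cakStepB znakovi.toList (znakovi.toList.length : Int)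
        (2 * ((znakovi.toList.length : Int) - 1))) (0, [])).2))

-- ===== PRECONDITION & SPEC =====
-- Pre_ excludes exactly the inputs where A raises IndexError: the empty string with a nonempty step list.
def Pre_cak (znakovi : String) (koraci : List Int) : Prop := znakovi ≠ "" ∨ koraci = []
instance (znakovi : String) (koraci : List Int) : Decidable (Pre_cak znakovi koraci) := by unfold Pre_cak; infer_instance
def pvWitness_cak : String × List Int := ("ab", [1])

def Spec_cak (znakovi : String) (koraci : List Int) (out : String) : Prop := out = cak_alt znakovi koraci
instance (znakovi : String) (koraci : List Int) (out : String) : Decidable (Spec_cak znakovi koraci out) := by unfold Spec_cak; infer_instance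

-- ===== CLAIM =====
def Claim_equal_cak : Prop := ∀ (znakovi : String) (koraci : List Int), Dom_cak znakovi koraci → Pre_cak znakovi koraci → Spec_cak znakovi koraci (cak znakovi koraci)

-- ===== LEMMAS AND PROOFS =====
-- triangle-wave reflection: B's per-step formula (emod form; B's mod = emod for a positive modulus)
def reflA (n x : Int) : Int :=
  if x % (2*(n-1)) < n then x % (2*(n-1)) else 2*(n-1) - x % (2*(n-1))

theorem reflA_bounds (n x : Int) (h : 2 ≤ n) : 0 ≤ reflA n x ∧ reflA n x ≤ n - 1 := by
  unfold reflA
  have h0 : 0 ≤ x % (2*(n-1)) := Int.emod_nonneg x (by omega)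
  have h1 : x % (2*(n-1)) < 2*(n-1) := Int.emod_lt_of_pos x (by omega)
  split_ifs <;> omega

theorem reflA_neg (n x : Int) (h : 2 ≤ n) : reflA n (-x) = reflA n x := by
  have hL : (0:Int) < 2*(n-1) := by omega
  have h0 : 0 ≤ x % (2*(n-1)) := Int.emod_nonneg x (by omega)
  have h1 : x % (2*(n-1)) < 2*(n-1) := Int.emod_lt_of_pos x hL
  have h0' : 0 ≤ (-x) % (2*(n-1)) := Int.emod_nonneg (-x) (by omega)
  have h1' : (-x) % (2*(n-1)) < 2*(n-1) := Int.emod_lt_of_pos (-x) hL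
  have hz0 : (x % (2*(n-1)) + (-x) % (2*(n-1))) % (2*(n-1)) = 0 := by
    rw [← Int.add_emod]; simp
  obtain ⟨c, hc⟩ := Int.dvd_of_emod_eq_zero hz0
  have hc0 : c = 0 ∨ c = 1 := by
    rcases lt_trichotomy c 0 with hlt | heq | hgt
    · nlinarith
    · left; exact heq
    · right; nlinarith
  unfold reflA
  rcases hc0 with rfl | rfl <;> simp only [mul_zero, mul_one] at hc <;> split_ifs <;> omega

theorem reflA_add_L (n x : Int) : reflA n (x + 2*(n-1)) = reflA n x := by
  unfold reflA
  rw [show x + 2*(n-1) = x + 2*(n-1)*1 from by ring, Int.add_mul_emod_self_left]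

theorem walk_eq (n : Int) (h : 2 ≤ n) :
    ∀ (m : Nat) (i s : Int), 0 ≤ i → i ≤ n - 1 → (s = 1 ∨ s = -1) →
      (cakWalk n m (i, s)).1 = reflA n (i + s * m) := by
  intro m
  induction m with
  | zero =>
    intro i s h0 h1 _
    simp only [cakWalk, reflA]
    rw [Int.emod_eq_of_lt (by omega) (by omega)]
    simp only [Nat.cast_zero, mul_zero, add_zero]
    omega
  | succ m ih =>
    intro i s h0 h1 hs
    show (cakWalk n m (cakStep n i s)).1 = reflA n (i + s * (m+1 : Nat))
    unfold cakStep
    by_cases hc1 : i = 0 ∧ s = -1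
    · obtain ⟨hi, hsv⟩ := hc1
      subst hi; subst hsv
      rw [if_pos ⟨rfl, rfl⟩]
      have hih := ih (0 + 1) 1 (by omega) (by omega) (Or.inl rfl)
      simp only at hih
      rw [hih]
      have e : (0:Int) + 1 + 1 * (m:Int) = -(0 + (-1) * (((m+1 : Nat)) : Int)) := by push_cast; ring
      rw [e, reflA_neg n _ h]
    · rw [if_neg hc1]
      by_cases hc2 : i = n - 1 ∧ s = 1
      · obtain ⟨hi, hsv⟩ := hc2
        subst hi; subst hsv
        rw [if_pos ⟨rfl, rfl⟩]
        have hih := ih (n - 1 - 1) (-1) (by omega) (by omega) (Or.inr rfl)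
        simp only at hih
        rw [hih]
        have e1 : (n - 1 : Int) - 1 + (-1) * (m:Int) = n - 2 - m := by ring
        have e2 : (n - 1 : Int) + 1 * (((m+1 : Nat)) : Int) = -(n - 2 - (m:Int)) + 2*(n-1) := by
          push_cast; ring
        rw [e1, e2, reflA_add_L, reflA_neg n _ h]
      · rw [if_neg hc2]
        have hi' : 0 ≤ i + s ∧ i + s ≤ n - 1 := by
          rcases hs with hsv | hsv <;> (subst hsv; constructor <;> omega)
        have hih := ih (i + s) s hi'.1 hi'.2 hs
        simp only at hih
        rw [hih]
        congr 1
        push_cast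
        ring

theorem stepA_eq (cs : List Char) (h : 2 ≤ (cs.length : Int)) (i : Int) (acc : List Char) (k : Int)
    (h0 : 0 ≤ i) (h1 : i ≤ (cs.length : Int) - 1) :
    cakStepA cs (cs.length : Int) (i, acc) k =
      (reflA (cs.length : Int) (i + k),
       acc ++ [(PySem.List.pyGet? cs (reflA (cs.length : Int) (i + k))).getD ' ']) := by
  unfold cakStepA
  have hw : (cakWalk (cs.length : Int) k.natAbs (i, if 0 < k then 1 else -1)).1 =
      reflA (cs.length : Int) (i + k) := by
    rw [walk_eq (cs.length : Int) h k.natAbs i _ h0 h1 (by split_ifs <;> simp)]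
    congr 1
    split_ifs with hk
    · rw [Int.natAbs_of_nonneg (by omega)]; ring
    · rw [Int.ofNat_natAbs_of_nonpos (by omega)]; ring
  simp only [hw]

theorem stepB_eq (cs : List Char) (h : 2 ≤ (cs.length : Int)) (i : Int) (acc : List (List Char)) (k : Int) :
    cakStepB cs (cs.length : Int) (2*((cs.length : Int)-1)) (i, acc) k =
      (reflA (cs.length : Int) (i + k),
       acc ++ [[(PySem.List.pyGet? cs (reflA (cs.length : Int) (i + k))).getD ' ']]) := by
  unfold cakStepB reflA
  rw [PySem.Int.mod_eq_emod_of_pos (by omega)]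

theorem fold_rel (cs : List Char) (h : 2 ≤ (cs.length : Int)) :
    ∀ (ks : List Int) (i : Int) (acc : List Char), 0 ≤ i → i ≤ (cs.length : Int) - 1 →
      ks.foldl (cakStepB cs (cs.length : Int) (2*((cs.length : Int)-1))) (i, acc.map (fun c => [c])) =
        ((ks.foldl (cakStepA cs (cs.length : Int)) (i, acc)).1,
         ((ks.foldl (cakStepA cs (cs.length : Int)) (i, acc)).2).map (fun c => [c])) := by
  intro ks
  induction ks with
  | nil => intro i acc _ _; simp [List.foldl]
  | cons k ks ih =>
    intro i acc h0 h1
    simp only [List.foldl]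
    rw [stepA_eq cs h i acc k h0 h1, stepB_eq cs h i _ k]
    have hb := reflA_bounds (cs.length : Int) (i + k) (by omega)
    rw [show (acc.map (fun c => [c])) ++ [[(PySem.List.pyGet? cs (reflA (cs.length : Int) (i + k))).getD ' ']]
          = ((acc ++ [(PySem.List.pyGet? cs (reflA (cs.length : Int) (i + k))).getD ' ']).map (fun c => [c]))
        from by simp]
    exact ih (reflA (cs.length : Int) (i + k)) _ hb.1 hb.2

-- ===== VERDICT =====
theorem cak_spec : Claim_equal_cak := by
  intro znakovi koraci _ hpre
  unfold Spec_cak cak cak_alt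
  by_cases h1 : ((znakovi.toList.length : Int)) = 1
  · rw [if_pos h1, if_pos h1]
  · rw [if_neg h1, if_neg h1]
    by_cases hz : znakovi = ""
    · have hk : koraci = [] := by
        rcases hpre with hp | hp
        · exact absurd hz hp
        · exact hp
      subst hz; subst hk
      rfl
    · have hn : 2 ≤ (znakovi.toList.length : Int) := by
        have hne : znakovi.toList ≠ [] := by
          intro hc
          apply hz
          have := congrArg String.ofList hc
          simpa using this
        have : 0 < znakovi.toList.length := List.length_pos_of_ne_nil hne
        omega
      have hrel := fold_rel znakovi.toList hn koraci 0 [] (by omega) (by omega)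
      simp only [List.map_nil] at hrel
      rw [hrel]
      congr 1
      exact (PySem.Chars.join_nil_singletons _).symm
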